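-- pv_equiv track=rewrite | github.com/EdwardG5/Project85 | Edward/compressionV2.py | getStringFromInfo
-- ===== SOURCE A (Python) =====
-- def redoInsertions(dna, insertions):
--     if insertions == []:
--         return dna
--     else:
--         (position, s) = insertions.pop()
--         before, after = dna[:position], dna[position:]
--         rec = redoInsertions(before, insertions)
--         return rec+list(s)+after
--
-- def getStringFromInfo(reference, insertions, deletions, ns, others, mismatches):
--     reference = list(reference)
--     dna = list(reference)
--     # Insert the mismatches
--     for (i, l) in mismatches:
--         dna[i] = l
--     # Replace the strange characters
--     for (i, l) in others:
--         dna[i] = l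
--     # Replace the Ns
--     for (startingPosition, length) in ns:
--         dna[startingPosition:startingPosition+length] = ["N" for _ in range(length)]
--     # Delete the inserted parts
--     for (startingPosition, length) in deletions:
--         dna[startingPosition:startingPosition+length] = ["-" for _ in range(length)]
--     # Fix the insertions
--     dna = redoInsertions(dna, insertions)
--     # Now remove the "-"s.
--     dna = filter(lambda x: x != "-", dna)
--     # Done : ).
--     return "".join(dna)
-- ===== SOURCE B (Python) =====
-- def _overwrite(dna, runs, marker):
--     for start, length in runs:
--         dna[start:start + length] = marker * length
--
-- def getStringFromInfo(reference, insertions, deletions, ns, others, mismatches):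
--     dna = list(reference)
--     for i, l in mismatches + others:
--         dna[i] = l
--     _overwrite(dna, ns, "N")
--     _overwrite(dna, deletions, "-")
--     # apply the insertions back to front, collecting segments; join once at the end
--     pieces = []
--     for p, s in reversed(insertions):
--         pieces.append(dna[p:])
--         pieces.append(s)
--         dna = dna[:p]
--     pieces.append(dna)
--     return "".join(c for piece in reversed(pieces) for c in piece if c != "-")
-- ===== Notes on version B (the rewrite author's own statement) =====
-- stated objective: faster
-- what changed: Replaces the recursive redoInsertions (pop from the caller's list, recurse on the prefix, re-concatenate rec+list(s)+after at every level) with an iterative backwards pass that collects the untouched suffix segments and inserted strings into a pieces list joined once at the end; the two item-assignment loops merge into one pass over mismatches+others, the two slice-replacement loops share one helper, and the '-' markers are filtered during the final join instead of a separate filter pass.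
import Mathlib
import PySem

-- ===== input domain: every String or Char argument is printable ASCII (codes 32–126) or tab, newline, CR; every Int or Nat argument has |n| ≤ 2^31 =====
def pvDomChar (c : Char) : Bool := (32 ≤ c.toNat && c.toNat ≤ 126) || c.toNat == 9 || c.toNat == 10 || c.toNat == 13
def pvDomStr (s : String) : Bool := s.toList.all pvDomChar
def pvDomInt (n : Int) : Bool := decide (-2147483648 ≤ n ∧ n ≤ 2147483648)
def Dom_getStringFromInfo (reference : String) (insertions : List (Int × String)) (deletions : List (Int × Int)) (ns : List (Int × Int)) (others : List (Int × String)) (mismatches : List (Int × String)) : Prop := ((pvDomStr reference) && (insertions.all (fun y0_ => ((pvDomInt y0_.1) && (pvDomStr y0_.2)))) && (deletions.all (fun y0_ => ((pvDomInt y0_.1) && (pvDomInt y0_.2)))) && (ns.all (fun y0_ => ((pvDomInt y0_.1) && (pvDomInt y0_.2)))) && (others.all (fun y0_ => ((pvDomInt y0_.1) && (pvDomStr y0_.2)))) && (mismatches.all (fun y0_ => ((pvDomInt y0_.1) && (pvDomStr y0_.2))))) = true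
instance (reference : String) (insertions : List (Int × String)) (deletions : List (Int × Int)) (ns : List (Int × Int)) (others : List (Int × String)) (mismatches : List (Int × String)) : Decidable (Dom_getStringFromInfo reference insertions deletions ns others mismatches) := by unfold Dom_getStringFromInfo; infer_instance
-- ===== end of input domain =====

-- B unrolls A's recursive redoInsertions into an iterative backwards pass collecting pieces
-- joined once (objective: alternative). Equivalence is about the RETURN value only: Python A
-- empties the caller's `insertions` list via pop(); B does not mutate its arguments.

-- list(s): a Python string as a list of one-character strings (used by both ports)
def pvChars (s : String) : List String := s.toList.map (fun c => String.ofList [c])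

-- ===== PORT A =====
-- A's recursive redoInsertions: pops the LAST insertion, recurses on the prefix dna[:position]
def redoInsertions (dna : List String) (ins : List (Int × String)) : List String :=
  match h : ins.getLast? with
  | none => dna   -- insertions == []
  | some ps =>
      redoInsertions (PySem.List.slice dna none (some ps.1)) ins.dropLast
        ++ pvChars ps.2 ++ PySem.List.slice dna (some ps.1) none
termination_by ins.length
decreasing_by
  have hne : ins ≠ [] := by rintro rfl; simp at h
  have := List.length_pos_of_ne_nil hne
  simp [List.length_dropLast]; omega

def getStringFromInfo (reference : String) (insertions : List (Int × String)) (deletions : List (Int × Int)) (ns : List (Int × Int)) (others : List (Int × String)) (mismatches : List (Int × String)) : String :=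
  -- reference = list(reference); dna = list(reference)
  let dna0 := pvChars reference
  -- for (i, l) in mismatches: dna[i] = l   (total under Pre_: index in range)
  let dna1 := mismatches.foldl (fun dna il => PySem.List.pySetD dna il.1 il.2) dna0
  -- for (i, l) in others: dna[i] = l
  let dna2 := others.foldl (fun dna il => PySem.List.pySetD dna il.1 il.2) dna1
  -- dna[sp:sp+len] = ["N"]*len — slice assignment hand-ported exactly: Python resolves both
  -- bounds with the clamped slice rule (= PySem.List.clampIdx) and floors the stop at the start;
  -- ["N" for _ in range(len)] = replicate len.toNat (empty for negative len)
  let dna3 := ns.foldl (fun dna sl =>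
      PySem.List.slice dna none (some sl.1) ++ List.replicate sl.2.toNat "N"
        ++ dna.drop (max (PySem.List.clampIdx dna.length (sl.1 + sl.2)) (PySem.List.clampIdx dna.length sl.1))) dna2
  let dna4 := deletions.foldl (fun dna sl =>
      PySem.List.slice dna none (some sl.1) ++ List.replicate sl.2.toNat "-"
        ++ dna.drop (max (PySem.List.clampIdx dna.length (sl.1 + sl.2)) (PySem.List.clampIdx dna.length sl.1))) dna3
  let dna5 := redoInsertions dna4 insertions
  -- "".join(filter(lambda x: x != "-", dna))
  PySem.Str.join "" (dna5.filter (fun x => x != "-"))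

-- ===== PORT B =====
-- _overwrite(dna, runs, marker): dna[start:start+length] = marker*length for each run —
-- the same hand-ported slice-assignment rule as in port A (Python clamps both bounds and
-- floors the stop at the start; marker*length = replicate length.toNat marker)
def pvOverwrite (dna : List String) (runs : List (Int × Int)) (marker : String) : List String :=
  runs.foldl (fun dna sl =>
    PySem.List.slice dna none (some sl.1) ++ List.replicate sl.2.toNat marker
      ++ dna.drop (max (PySem.List.clampIdx dna.length (sl.1 + sl.2)) (PySem.List.clampIdx dna.length sl.1))) dna

-- B's loop body: shrink dna to dna[:p], record dna[p:] and the inserted characters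
def insStep (st : List String × List (List String)) (ps : Int × String) : List String × List (List String) :=
  (PySem.List.slice st.1 none (some ps.1),
   st.2 ++ [PySem.List.slice st.1 (some ps.1) none, pvChars ps.2])

def getStringFromInfo_alt (reference : String) (insertions : List (Int × String)) (deletions : List (Int × Int)) (ns : List (Int × Int)) (others : List (Int × String)) (mismatches : List (Int × String)) : String :=
  let dna0 := pvChars reference
  -- for (i, l) in mismatches + others: dna[i] = l
  let dna1 := (mismatches ++ others).foldl (fun dna il => PySem.List.pySetD dna il.1 il.2) dna0
  -- _overwrite(dna, ns, "N"); _overwrite(dna, deletions, "-")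
  let dna2 := pvOverwrite (pvOverwrite dna1 ns "N") deletions "-"
  -- iterative backwards pass over the insertions, collecting pieces
  let st := insertions.reverse.foldl insStep (dna2, [])
  let pieces := (st.2 ++ [st.1]).reverse
  PySem.Str.join "" (pieces.flatten.filter (fun c => c != "-"))

-- ===== PRECONDITION & SPEC =====
-- Pre_ excludes exactly the inputs where Python A raises IndexError: a mismatch or `others`
-- entry whose index is out of range for the reference (item assignment happens before any
-- length-changing edit, so the bound is len(reference)).
def Pre_getStringFromInfo (reference : String) (insertions : List (Int × String)) (deletions : List (Int × Int)) (ns : List (Int × Int)) (others : List (Int × String)) (mismatches : List (Int × String)) : Prop :=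
  ∀ il ∈ mismatches ++ others, PySem.Raise.InRange reference.toList.length il.1
instance (reference : String) (insertions : List (Int × String)) (deletions : List (Int × Int)) (ns : List (Int × Int)) (others : List (Int × String)) (mismatches : List (Int × String)) : Decidable (Pre_getStringFromInfo reference insertions deletions ns others mismatches) := by unfold Pre_getStringFromInfo; infer_instance

def pvWitness_getStringFromInfo : String × (List (Int × String)) × (List (Int × Int)) × (List (Int × Int)) × (List (Int × String)) × (List (Int × String)) :=
  ("ACGT", [(1, "TT"), (-1, "g")], [(0, 1)], [(1, 2)], [(0, "x")], [(-2, "C")])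

def Spec_getStringFromInfo (reference : String) (insertions : List (Int × String)) (deletions : List (Int × Int)) (ns : List (Int × Int)) (others : List (Int × String)) (mismatches : List (Int × String)) (out : String) : Prop := out = getStringFromInfo_alt reference insertions deletions ns others mismatches
instance (reference : String) (insertions : List (Int × String)) (deletions : List (Int × Int)) (ns : List (Int × Int)) (others : List (Int × String)) (mismatches : List (Int × String)) (out : String) : Decidable (Spec_getStringFromInfo reference insertions deletions ns others mismatches out) := by unfold Spec_getStringFromInfo; infer_instance

-- ===== CLAIM (what is proved, stated in full; the proofs are below) =====
def Claim_equal_getStringFromInfo : Prop := ∀ (reference : String) (insertions : List (Int × String)) (deletions : List (Int × Int)) (ns : List (Int × Int)) (others : List (Int × String)) (mismatches : List (Int × String)), Dom_getStringFromInfo reference insertions deletions ns others mismatches → Pre_getStringFromInfo reference insertions deletions ns others mismatches → Spec_getStringFromInfo reference insertions deletions ns others mismatches (getStringFromInfo reference insertions deletions ns others mismatches)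

-- ===== LEMMAS AND PROOFS =====

lemma redo_nil (dna : List String) : redoInsertions dna [] = dna := by
  rw [redoInsertions]
  split
  · rfl
  · next h => simp at h

lemma redo_concat (dna : List String) (ins : List (Int × String)) (ps : Int × String) :
    redoInsertions dna (ins ++ [ps]) =
      redoInsertions (PySem.List.slice dna none (some ps.1)) ins
        ++ pvChars ps.2 ++ PySem.List.slice dna (some ps.1) none := by
  rw [redoInsertions]
  split
  · next h => simp at h
  · next ps' h =>
      rw [List.getLast?_concat] at h
      cases h
      simp [List.append_assoc]

-- the assembled value of B's loop state: the remaining prefix followed by the pieces in order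
def pvAsm (st : List String × List (List String)) : List String :=
  st.1 ++ st.2.reverse.flatten

-- INVARIANT: A's recursion equals B's backwards segment-collecting pass
lemma redo_eq_fold (ins : List (Int × String)) :
    ∀ (dna : List String) (P : List (List String)),
      redoInsertions dna ins ++ P.reverse.flatten
        = pvAsm (ins.reverse.foldl insStep (dna, P)) := by
  induction ins using List.reverseRecOn with
  | nil => intro dna P; simp [redo_nil, pvAsm]
  | append_singleton ins ps ih =>
    intro dna P
    rw [redo_concat, List.reverse_append]
    simp only [List.reverse_singleton, List.singleton_append, List.foldl_cons]
    rw [show insStep (dna, P) ps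
        = (PySem.List.slice dna none (some ps.1),
           P ++ [PySem.List.slice dna (some ps.1) none, pvChars ps.2]) from rfl,
      ← ih]
    simp [List.append_assoc]

-- ===== VERDICT (by name: the statement is the Claim_ definition above) =====
theorem getStringFromInfo_spec : Claim_equal_getStringFromInfo := by
  intro reference insertions deletions ns others mismatches _ _
  unfold Spec_getStringFromInfo getStringFromInfo getStringFromInfo_alt pvOverwrite
  simp only [List.foldl_append]
  -- both sides now share the edited list `D`; relate the two insertion passes
  generalize (deletions.foldl _ _ : List String) = D
  have h := redo_eq_fold insertions D []
  simp only [List.reverse_nil, List.flatten_nil, List.append_nil] at h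
  rw [h]
  rcases insertions.reverse.foldl insStep (D, []) with ⟨d', P'⟩
  simp [pvAsm]
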